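-- pv_equiv track=rewrite | github.com/skyamat0/42 | 42/practice/vantan_python__subs/vt_state.py | is_state
-- ===== SOURCE A (Python) =====
-- def is_state(argv):
-- 	states = {
-- 	"Oregon" : "OR",
-- 	"Alabama" : "AL",
-- 	"New Jersey": "NJ",
-- 	"Colorado" : "CO"
-- 	}
-- 	capital_cities = {
-- 	"OR": "Salem",
-- 	"AL": "Montgomery",
-- 	"NJ": "Trenton",
-- 	"CO": "Denver"
-- 	}
-- 	if argv in list(capital_cities.values()):
-- 		for cap_key, cap_val in capital_cities.items():
-- 			if argv == cap_val:
-- 				for st_key, st_val in states.items():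
-- 					if cap_key == st_val:
-- 						return (st_key)
-- 	else:
-- 		return ("Unknown capital city")
-- ===== SOURCE B (Python) =====
-- def is_state(argv):
--     capital_to_state = {
--         "Salem": "Oregon",
--         "Montgomery": "Alabama",
--         "Trenton": "New Jersey",
--         "Denver": "Colorado",
--     }
--     return capital_to_state.get(argv, "Unknown capital city")
-- ===== Notes on version B (the rewrite author's own statement) =====
-- stated objective: simpler
-- what changed: Replaced the membership test plus two nested scan loops joining capitals to states via abbreviations by one precomputed capital-to-state dict and a single .get with the default string.
import Mathlib
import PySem

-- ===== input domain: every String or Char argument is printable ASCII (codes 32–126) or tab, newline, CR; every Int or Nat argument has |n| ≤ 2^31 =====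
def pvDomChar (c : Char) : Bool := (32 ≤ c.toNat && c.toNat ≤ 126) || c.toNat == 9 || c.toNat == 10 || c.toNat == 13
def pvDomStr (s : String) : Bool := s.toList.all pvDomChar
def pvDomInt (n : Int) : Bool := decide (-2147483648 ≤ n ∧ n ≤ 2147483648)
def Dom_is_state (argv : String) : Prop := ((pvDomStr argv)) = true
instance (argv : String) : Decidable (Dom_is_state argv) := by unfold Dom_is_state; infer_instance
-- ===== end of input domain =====

-- B replaces A's membership test + two nested join loops with one precomputed
-- capital→state dict lookup with a default (simpler).

-- ===== PORT A =====
def pvStatesA : List (String × String) :=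
  [("Oregon", "OR"), ("Alabama", "AL"), ("New Jersey", "NJ"), ("Colorado", "CO")]

def pvCapitalsA : List (String × String) :=
  [("OR", "Salem"), ("AL", "Montgomery"), ("NJ", "Trenton"), ("CO", "Denver")]

-- inner loop: for st_key, st_val in states.items(): if cap_key == st_val: return st_key
def pvInnerA (cap_key : String) : List (String × String) → Option String
  | [] => none
  | (st_key, st_val) :: rest =>
      if cap_key == st_val then some st_key else pvInnerA cap_key rest

-- outer loop: for cap_key, cap_val in capital_cities.items(): if argv == cap_val: <inner loop>
def pvOuterA (argv : String) : List (String × String) → Option String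
  | [] => none
  | (cap_key, cap_val) :: rest =>
      if argv == cap_val then
        match pvInnerA cap_key pvStatesA with
        | some s => some s
        | none => pvOuterA argv rest
      else pvOuterA argv rest

def is_state (argv : String) : Option String :=
  if argv ∈ pvCapitalsA.map Prod.snd then
    pvOuterA argv pvCapitalsA
  else
    some "Unknown capital city"

-- ===== PORT B =====
def pvCapitalToState : PySem.Dict String String :=
  PySem.Dict.ofList
    [("Salem", "Oregon"), ("Montgomery", "Alabama"),
     ("Trenton", "New Jersey"), ("Denver", "Colorado")]

def is_state_alt (argv : String) : Option String :=
  some (PySem.Dict.getD pvCapitalToState argv "Unknown capital city")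

-- ===== PRECONDITION & SPEC =====
def Spec_is_state (argv : String) (out : Option String) : Prop := out = is_state_alt argv
instance (argv : String) (out : Option String) : Decidable (Spec_is_state argv out) := by unfold Spec_is_state; infer_instance

-- ===== CLAIM (what is proved, stated in full; the proofs are below) =====
def Claim_equal_is_state : Prop := ∀ (argv : String), Dom_is_state argv → Spec_is_state argv (is_state argv)

-- ===== LEMMAS AND PROOFS =====

-- ===== VERDICT (by name: the statement is the Claim_ definition above) =====
theorem is_state_spec : Claim_equal_is_state := by
  intro argv _
  unfold Spec_is_state
  by_cases h1 : argv = "Salem"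
  · subst h1; rfl
  by_cases h2 : argv = "Montgomery"
  · subst h2; rfl
  by_cases h3 : argv = "Trenton"
  · subst h3; rfl
  by_cases h4 : argv = "Denver"
  · subst h4; rfl
  · have hmk : pvCapitalToState
        = PySem.Dict.mk [("Salem", "Oregon"), ("Montgomery", "Alabama"),
            ("Trenton", "New Jersey"), ("Denver", "Colorado")] := by rfl
    simp [is_state, is_state_alt, pvCapitalsA, PySem.Dict.getD, hmk,
      PySem.Dict.get?, h1, h2, h3, h4, Ne.symm h1, Ne.symm h2, Ne.symm h3, Ne.symm h4]
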